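-- pv_equiv track=rewrite | github.com/mld-0/leetcode | 1679-max-number-of-k-sum-pairs.py | maxOperations_Counter
-- ===== SOURCE A (Python) =====
-- from collections import defaultdict, Counter
-- from typing import List, Optional
--
-- def maxOperations_Counter(nums: List[int], k: int) -> int:
--     c = Counter(nums)
--     result = 0
--     for n in c.keys():
--         if n + n == k and c[n] > 1:
--             result += c[n] // 2
--             c[n] %= 2
--     for n in c.keys():
--         if c[n] > 0:
--             delta = k - n
--             if delta == n:
--                 continue
--             if delta in c.keys() and c[delta] > 0:
--                 pairs = min(c[n], c[delta])
--                 c[n] -= pairs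
--                 c[delta] -= pairs
--                 result += pairs
--     return result
-- ===== SOURCE B (Python) =====
-- from collections import Counter
--
-- def maxOperations_Counter(nums, k):
--     c = Counter(nums)
--     result = sum(min(v, c[k - n]) for n, v in c.items() if 2 * n < k)
--     if k % 2 == 0:
--         result += c[k // 2] // 2
--     return result
-- ===== Notes on version B (the rewrite author's own statement) =====
-- stated objective: simpler
-- what changed: B replaces A's two mutating passes over the Counter (a dedicated half-pair pass plus a pair-cancellation pass that decrements both counts) with a single pure closed-form sum: min(c[n], c[k-n]) over distinct values n with 2n < k, plus c[k//2] // 2 when k is even.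
import Mathlib
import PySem

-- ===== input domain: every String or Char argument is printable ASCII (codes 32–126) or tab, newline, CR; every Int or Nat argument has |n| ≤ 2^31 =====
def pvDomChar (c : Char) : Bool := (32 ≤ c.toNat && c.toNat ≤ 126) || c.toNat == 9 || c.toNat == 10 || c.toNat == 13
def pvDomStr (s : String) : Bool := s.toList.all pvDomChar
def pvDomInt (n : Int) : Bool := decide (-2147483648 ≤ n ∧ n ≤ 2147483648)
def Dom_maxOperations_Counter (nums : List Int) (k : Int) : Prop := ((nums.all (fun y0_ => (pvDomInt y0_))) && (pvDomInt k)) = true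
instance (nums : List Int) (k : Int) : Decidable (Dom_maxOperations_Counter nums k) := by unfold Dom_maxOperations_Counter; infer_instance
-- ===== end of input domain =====

-- B replaces A's two mutating cancellation passes over the Counter by a single pure
-- closed-form sum over the counter's items (pairs attributed to the smaller endpoint): simpler.


-- ===== PORT A =====
-- first loop body: 'if n + n == k and c[n] > 1: result += c[n] // 2; c[n] %= 2'
def pvLoop1 (k : Int) (st : Int × PySem.Dict Int Int) (n : Int) : Int × PySem.Dict Int Int :=
  let result := st.1
  let c := st.2
  if n + n = k ∧ c.getD n 0 > 1 then
    (result + PySem.Int.floordiv (c.getD n 0) 2, c.insert n (PySem.Int.mod (c.getD n 0) 2))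
  else (result, c)

-- second loop body
def pvLoop2 (k : Int) (st : Int × PySem.Dict Int Int) (n : Int) : Int × PySem.Dict Int Int :=
  let result := st.1
  let c := st.2
  if c.getD n 0 > 0 then
    let delta := k - n
    if delta = n then (result, c)
    else if c.contains delta ∧ c.getD delta 0 > 0 then
      let pairs := min (c.getD n 0) (c.getD delta 0)
      (result + pairs, (c.insert n (c.getD n 0 - pairs)).insert delta (c.getD delta 0 - pairs))
    else (result, c)
  else (result, c)

def maxOperations_Counter (nums : List Int) (k : Int) : Int :=
  let c := PySem.Dict.counter nums
  let st1 := c.keys.foldl (pvLoop1 k) (0, c)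
  let st2 := st1.2.keys.foldl (pvLoop2 k) st1
  st2.1

-- ===== PORT B =====
def maxOperations_Counter_alt (nums : List Int) (k : Int) : Int :=
  let c := PySem.Dict.counter nums
  let result := ((c.items.filter (fun p => 2 * p.1 < k)).map
      (fun p => min p.2 (c.getD (k - p.1) 0))).sum
  if PySem.Int.mod k 2 = 0 then result + PySem.Int.floordiv (c.getD (PySem.Int.floordiv k 2) 0) 2
  else result

-- ===== PRECONDITION & SPEC =====
def Spec_maxOperations_Counter (nums : List Int) (k : Int) (out : Int) : Prop := out = maxOperations_Counter_alt nums k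
instance (nums : List Int) (k : Int) (out : Int) : Decidable (Spec_maxOperations_Counter nums k out) := by unfold Spec_maxOperations_Counter; infer_instance

-- ===== CLAIM (what is proved, stated in full; the proofs are below) =====
def Claim_equal_maxOperations_Counter : Prop := ∀ (nums : List Int) (k : Int), Dom_maxOperations_Counter nums k → Spec_maxOperations_Counter nums k (maxOperations_Counter nums k)


-- ===== LEMMAS AND PROOFS =====

-- count of v in nums, as an Int (the value Counter(nums)[v])
def pvCnt (nums : List Int) (v : Int) : Int := (nums.count v : Int)

-- the amount loop 2 adds: each unordered pair {n, k-n} of distinct keys is charged to its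
-- first-listed endpoint, the key k/2 contributes nothing
def pvS (k : Int) (cnt : Int → Int) : List Int → Int
  | [] => 0
  | n :: t => (if 2*n = k then 0 else if (k-n) ∈ t then min (cnt n) (cnt (k-n)) else 0) + pvS k cnt t

lemma pvLoop1_skip (k : Int) (L : List Int) (h : ∀ n ∈ L, n + n ≠ k) (st : Int × PySem.Dict Int Int) :
    L.foldl (pvLoop1 k) st = st := by
  induction L generalizing st with
  | nil => rfl
  | cons n t ih =>
    have hn : n + n ≠ k := h n (by simp)
    simp only [List.foldl_cons, pvLoop1]
    rw [if_neg (by tauto)]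
    exact ih (fun m hm => h m (List.mem_cons_of_mem _ hm)) st

lemma pvLoop1_eq (k h0 : Int) (hh : h0 + h0 = k) (L : List Int) (hnd : L.Nodup) (r : Int) (d : PySem.Dict Int Int) :
    L.foldl (pvLoop1 k) (r, d) =
      if h0 ∈ L ∧ d.getD h0 0 > 1 then
        (r + PySem.Int.floordiv (d.getD h0 0) 2, d.insert h0 (PySem.Int.mod (d.getD h0 0) 2))
      else (r, d) := by
  induction L generalizing r d with
  | nil => simp
  | cons n t ih =>
    have hn := (List.nodup_cons.mp hnd).1
    have hndt := (List.nodup_cons.mp hnd).2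
    by_cases hne : n = h0
    · subst hne
      have hnin : n ∉ t := by simpa using hn
      have hskip : ∀ m ∈ t, m + m ≠ k := by
        intro m hm hmk
        have : m = n := by omega
        exact hnin (this ▸ hm)
      by_cases hg : d.getD n 0 > 1
      · simp only [List.foldl_cons, pvLoop1]
        rw [if_pos ⟨by omega, hg⟩]
        rw [pvLoop1_skip k t hskip]
        simp [hg]
      · simp only [List.foldl_cons, pvLoop1]
        rw [if_neg (by tauto)]
        rw [ih hndt r d]
        have : ¬ (n ∈ t) := hnin
        simp [this, hg]
    · have hnk : n + n ≠ k := by omega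
      simp only [List.foldl_cons, pvLoop1]
      rw [if_neg (by tauto)]
      rw [ih hndt r d]
      have : (h0 ∈ n :: t) = (h0 ∈ t) := by simp [Ne.symm hne]
      simp [this]

lemma pvLoop2_eq (k : Int) (cnt : Int → Int) :
    ∀ (L : List Int) (r : Int) (d : PySem.Dict Int Int),
      L.Nodup →
      (∀ n ∈ L, 0 < cnt n) →
      (∀ n ∈ L, d.contains n = true) →
      (∀ v, 0 ≤ d.getD v 0) →
      (∀ n ∈ L, 2*n ≠ k → (k-n) ∈ L → d.getD n 0 = cnt n) →
      (∀ n ∈ L, 2*n ≠ k → (k-n) ∉ L → min (d.getD n 0) (d.getD (k-n) 0) = 0) →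
      (L.foldl (pvLoop2 k) (r, d)).1 = r + pvS k cnt L := by
  intro L
  induction L with
  | nil => intro r d _ _ _ _ _ _; simp [pvS]
  | cons n t ih =>
    intro r d hnd hpos hcont hnn hA hB
    have hn : n ∉ t := (List.nodup_cons.mp hnd).1
    have hndt := (List.nodup_cons.mp hnd).2
    simp only [List.foldl_cons]
    rcases eq_or_ne (2*n) k with heq | hne
    · -- delta == n: the 'continue' branch, state unchanged
      have hstep : pvLoop2 k (r, d) n = (r, d) := by
        simp only [pvLoop2]
        by_cases hg : d.getD n 0 > 0
        · rw [if_pos hg, if_pos (by omega : k - n = n)]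
        · rw [if_neg hg]
      rw [hstep]
      rw [ih r d hndt (fun m hm => hpos m (List.mem_cons_of_mem _ hm))
        (fun m hm => hcont m (List.mem_cons_of_mem _ hm)) hnn
        (fun m hm h2 h3 => hA m (List.mem_cons_of_mem _ hm) h2 (List.mem_cons_of_mem _ h3))
        ?_]
      · simp [pvS, heq]
      · intro m hm h2 h3
        refine hB m (List.mem_cons_of_mem _ hm) h2 ?_
        intro hmem
        rcases List.mem_cons.mp hmem with h4 | h4
        · have : m = n := by omega
          exact hn (this ▸ hm)
        · exact h3 h4
    · by_cases hmem : (k - n) ∈ t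
      · -- contributing step
        have hknL : (k - n) ∈ n :: t := List.mem_cons_of_mem _ hmem
        have hdn : d.getD n 0 = cnt n := hA n (by simp) hne hknL
        have hdd : d.getD (k-n) 0 = cnt (k-n) := by
          have h5 : k - (k - n) = n := by ring
          have := hA (k-n) hknL (by omega) (by rw [h5]; simp)
          exact this
        have hposn : 0 < cnt n := hpos n (by simp)
        have hposd : 0 < cnt (k-n) := hpos (k-n) hknL
        have hstep : pvLoop2 k (r, d) n =
            (r + min (cnt n) (cnt (k-n)),
             (d.insert n (cnt n - min (cnt n) (cnt (k-n)))).insert (k-n)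
               (cnt (k-n) - min (cnt n) (cnt (k-n)))) := by
          simp only [pvLoop2]
          rw [if_pos (by omega : d.getD n 0 > 0)]
          rw [if_neg (by omega : ¬ k - n = n)]
          rw [if_pos ⟨hcont (k-n) hknL, by omega⟩]
          rw [hdn, hdd]
        rw [hstep]
        have hple1 : min (cnt n) (cnt (k-n)) ≤ cnt n := min_le_left _ _
        have hple2 : min (cnt n) (cnt (k-n)) ≤ cnt (k-n) := min_le_right _ _
        have hknn : k - n ≠ n := by omega
        have hget : ∀ v, ((d.insert n (cnt n - min (cnt n) (cnt (k-n)))).insert (k-n)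
              (cnt (k-n) - min (cnt n) (cnt (k-n)))).getD v 0 =
            if v = k-n then cnt (k-n) - min (cnt n) (cnt (k-n))
            else if v = n then cnt n - min (cnt n) (cnt (k-n))
            else d.getD v 0 := by
          intro v
          rw [PySem.Dict.getD_insert, PySem.Dict.getD_insert]
        rw [ih _ _ hndt (fun m hm => hpos m (List.mem_cons_of_mem _ hm)) ?_ ?_ ?_ ?_]
        · simp [pvS, hne, hmem]
          ring
        · intro m hm
          rw [PySem.Dict.contains_insert, PySem.Dict.contains_insert]
          simp [hcont m (List.mem_cons_of_mem _ hm)]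
        · intro v
          rw [hget v]
          have := hnn v
          split_ifs <;> omega
        · intro m hm h2 h3
          have hmn : m ≠ n := by rintro rfl; exact hn hm
          have hmkn : m ≠ k - n := by
            rintro rfl
            have : k - (k - n) = n := by ring
            exact hn (this ▸ h3)
          rw [hget m, if_neg hmkn, if_neg hmn]
          exact hA m (List.mem_cons_of_mem _ hm) h2 (List.mem_cons_of_mem _ h3)
        · intro m hm h2 h3
          by_cases hm1 : m = k - n
          · have hkm : k - m = n := by omega
            rw [hget m, if_pos hm1, hkm, hget n, if_neg (Ne.symm hknn), if_pos rfl]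
            omega
          · have hmn : m ≠ n := by rintro rfl; exact hn hm
            have hkm1 : k - m ≠ n := by omega
            have hkm2 : k - m ≠ k - n := by omega
            rw [hget m, if_neg hm1, if_neg hmn, hget (k-m), if_neg hkm2, if_neg hkm1]
            refine hB m (List.mem_cons_of_mem _ hm) h2 ?_
            intro h4
            rcases List.mem_cons.mp h4 with h5 | h5
            · exact hkm1 h5
            · exact h3 h5
      · -- partner gone (or never present): no-op step
        have hknL : (k - n) ∉ n :: t := by
          intro h4
          rcases List.mem_cons.mp h4 with h5 | h5
          · omega
          · exact hmem h5
        have hminz : min (d.getD n 0) (d.getD (k-n) 0) = 0 := hB n (by simp) hne hknL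
        have hstep : pvLoop2 k (r, d) n = (r, d) := by
          simp only [pvLoop2]
          by_cases hg : d.getD n 0 > 0
          · rw [if_pos hg, if_neg (by omega : ¬ k - n = n)]
            rw [if_neg ?_]
            have hz : d.getD (k-n) 0 = 0 := by
              have := hnn (k-n)
              omega
            rintro ⟨-, h6⟩
            omega
          · rw [if_neg hg]
        rw [hstep]
        rw [ih r d hndt (fun m hm => hpos m (List.mem_cons_of_mem _ hm))
          (fun m hm => hcont m (List.mem_cons_of_mem _ hm)) hnn
          (fun m hm h2 h3 => hA m (List.mem_cons_of_mem _ hm) h2 (List.mem_cons_of_mem _ h3))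
          ?_]
        · simp [pvS, hne, hmem]
        · intro m hm h2 h3
          refine hB m (List.mem_cons_of_mem _ hm) h2 ?_
          intro h4
          rcases List.mem_cons.mp h4 with h5 | h5
          · have : m = k - n := by omega
            exact hmem (this ▸ hm)
          · exact h3 h5

lemma pvSum_single (t : List Int) (f g : Int → Int) (a : Int) (ha : a ∈ t) (hnd : t.Nodup)
    (h : ∀ m ∈ t, m ≠ a → f m = g m) :
    (t.map f).sum = (t.map g).sum + (f a - g a) := by
  induction t with
  | nil => cases ha
  | cons x t ih =>
    have hx := (List.nodup_cons.mp hnd).1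
    have hndt := (List.nodup_cons.mp hnd).2
    rcases List.mem_cons.mp ha with hxa | hat
    · subst hxa
      have : t.map f = t.map g := by
        apply List.map_congr_left
        intro m hm
        exact h m (List.mem_cons_of_mem _ hm) (by rintro rfl; exact hx hm)
      simp [this]; ring
    · have hxa : x ≠ a := by rintro rfl; exact hx hat
      have hfx : f x = g x := h x (by simp) hxa
      have := ih hat hndt (fun m hm hma => h m (List.mem_cons_of_mem _ hm) hma)
      simp [hfx, this]; ring

lemma pvS_eq_T (k : Int) (cnt : Int → Int) :
    ∀ (L : List Int), L.Nodup →
      pvS k cnt L = (L.map (fun v => if 2*v < k ∧ (k-v) ∈ L then min (cnt v) (cnt (k-v)) else 0)).sum := by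
  intro L
  induction L with
  | nil => intro _; rfl
  | cons n t ih =>
    intro hnd
    have hn : n ∉ t := (List.nodup_cons.mp hnd).1
    have hndt := (List.nodup_cons.mp hnd).2
    simp only [pvS, List.map_cons, List.sum_cons]
    rw [ih hndt]
    rcases lt_trichotomy (2*n) k with hlt | heq | hgt
    · have htail : t.map (fun v => if 2*v < k ∧ (k-v) ∈ n :: t then min (cnt v) (cnt (k-v)) else 0)
          = t.map (fun v => if 2*v < k ∧ (k-v) ∈ t then min (cnt v) (cnt (k-v)) else 0) := by
        apply List.map_congr_left
        intro m _
        by_cases h1 : 2*m < k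
        · by_cases h2 : (k - m) = n
          · exact absurd h1 (by omega)
          · simp [List.mem_cons, h2]
        · simp [h1]
      rw [htail]
      have h2 : ¬ (2*n = k) := by omega
      have hne : ¬ ((k - n) = n) := by omega
      by_cases h3 : (k - n) ∈ t
      · simp [h2, h3, hlt, List.mem_cons]
      · simp [h2, h3, hlt, List.mem_cons, hne]
    · have htail : t.map (fun v => if 2*v < k ∧ (k-v) ∈ n :: t then min (cnt v) (cnt (k-v)) else 0)
          = t.map (fun v => if 2*v < k ∧ (k-v) ∈ t then min (cnt v) (cnt (k-v)) else 0) := by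
        apply List.map_congr_left
        intro m hm
        by_cases h2 : (k - m) = n
        · have : m = n := by omega
          exact absurd (this ▸ hm) hn
        · simp [List.mem_cons, h2]
      rw [htail]
      simp [heq]
    · have hhead : (if 2*n < k ∧ (k-n) ∈ n :: t then min (cnt n) (cnt (k-n)) else 0) = 0 := by
        simp [show ¬ (2*n < k) by omega]
      by_cases h3 : (k - n) ∈ t
      · have hsingle := pvSum_single t
          (fun v => if 2*v < k ∧ (k-v) ∈ n :: t then min (cnt v) (cnt (k-v)) else 0)
          (fun v => if 2*v < k ∧ (k-v) ∈ t then min (cnt v) (cnt (k-v)) else 0)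
          (k-n) h3 hndt ?_
        · rw [hsingle, hhead]
          have hv1 : (if 2*(k-n) < k ∧ (k-(k-n)) ∈ n :: t then min (cnt (k-n)) (cnt (k-(k-n))) else 0)
              = min (cnt (k-n)) (cnt n) := by
            have h5 : k - (k - n) = n := by ring
            rw [h5]
            simp [show 2*(k-n) < k by omega, List.mem_cons]
          have hv2 : (if 2*(k-n) < k ∧ (k-(k-n)) ∈ t then min (cnt (k-n)) (cnt (k-(k-n))) else 0) = 0 := by
            have h5 : k - (k - n) = n := by ring
            rw [h5]
            simp [hn]
          simp only [hv1, hv2]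
          simp [show ¬ (2*n = k) by omega, h3, min_comm (cnt n) (cnt (k-n))]
          ring
        · intro m hm hma
          by_cases h2 : (k - m) = n
          · exact absurd (by omega : m = k - n) hma
          · simp [List.mem_cons, h2]
      · have htail : t.map (fun v => if 2*v < k ∧ (k-v) ∈ n :: t then min (cnt v) (cnt (k-v)) else 0)
            = t.map (fun v => if 2*v < k ∧ (k-v) ∈ t then min (cnt v) (cnt (k-v)) else 0) := by
          apply List.map_congr_left
          intro m hm
          by_cases h2 : (k - m) = n
          · have hmkn : m = k - n := by omega
            exact absurd (hmkn ▸ hm) h3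
          · simp [List.mem_cons, h2]
        rw [htail, hhead]
        simp [show ¬ (2*n = k) by omega, h3]

lemma pvSum_filter_map {α : Type} (p : α → Bool) (f : α → Int) :
    ∀ (l : List α), ((l.filter p).map f).sum = (l.map (fun x => if p x then f x else 0)).sum := by
  intro l
  induction l with
  | nil => rfl
  | cons x t ih =>
    by_cases hp : p x
    · simp [hp, ih]
    · simp [hp, ih]

lemma pvCnt_nonneg (nums : List Int) (v : Int) : 0 ≤ pvCnt nums v := by
  simp [pvCnt]

lemma pvCnt_pos (nums : List Int) (v : Int) (h : v ∈ nums) : 0 < pvCnt nums v := by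
  unfold pvCnt
  exact_mod_cast List.count_pos_iff.mpr h

lemma pvCnt_zero (nums : List Int) (v : Int) (h : v ∉ nums) : pvCnt nums v = 0 := by
  unfold pvCnt
  exact_mod_cast List.count_eq_zero.mpr h

lemma pvAlt_eq (nums : List Int) (k : Int) :
    maxOperations_Counter_alt nums k =
      ((PySem.Set.ofList nums).map
        (fun v => if 2*v < k then min (pvCnt nums v) (pvCnt nums (k-v)) else 0)).sum
      + (if PySem.Int.mod k 2 = 0 then
          PySem.Int.floordiv (pvCnt nums (PySem.Int.floordiv k 2)) 2 else 0) := by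
  unfold maxOperations_Counter_alt
  dsimp only
  rw [PySem.Dict.items_counter, List.filter_map, List.map_map, pvSum_filter_map]
  by_cases hk : PySem.Int.mod k 2 = 0
  · rw [if_pos hk, if_pos hk]
    congr 1
    · apply congrArg
      apply List.map_congr_left
      intro v _
      simp [Function.comp, pvCnt, PySem.Dict.getD_counter]
    · rw [PySem.Dict.getD_counter]
      rfl
  · rw [if_neg hk, if_neg hk, add_zero]
    apply congrArg
    apply List.map_congr_left
    intro v _
    simp [Function.comp, pvCnt, PySem.Dict.getD_counter]

lemma pvA_eq (nums : List Int) (k : Int) :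
    maxOperations_Counter nums k =
      (if PySem.Int.mod k 2 = 0 then
        PySem.Int.floordiv (pvCnt nums (PySem.Int.floordiv k 2)) 2 else 0)
      + pvS k (pvCnt nums) (PySem.Set.ofList nums) := by
  unfold maxOperations_Counter
  dsimp only
  have hkeys := PySem.Dict.keys_counter nums
  have hnd := PySem.Dict.nodup_keys_counter nums
  have hmemK : ∀ v, v ∈ (PySem.Dict.counter nums).keys ↔ v ∈ nums := by
    intro v
    rw [hkeys]
    exact PySem.Set.mem_ofList nums v
  by_cases hk : PySem.Int.mod k 2 = 0
  · -- k even: loop 1 folds the k/2 key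
    rw [if_pos hk]
    have h2k : (2 : Int) ∣ k := (PySem.Int.mod_eq_zero_iff_dvd k 2).mp hk
    obtain ⟨h0, hh0⟩ := h2k
    have hfd : PySem.Int.floordiv k 2 = h0 := by
      rw [PySem.Int.floordiv_eq_ediv_of_pos (by omega)]
      omega
    rw [pvLoop1_eq k h0 (by omega) _ hnd 0 _]
    by_cases hc : h0 ∈ (PySem.Dict.counter nums).keys ∧ (PySem.Dict.counter nums).getD h0 0 > 1
    · rw [if_pos hc]
      have hkeq : ((PySem.Dict.counter nums).insert h0
          (PySem.Int.mod ((PySem.Dict.counter nums).getD h0 0) 2)).keys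
          = (PySem.Dict.counter nums).keys :=
        PySem.Dict.keys_insert_of_contains _ _
          ((PySem.Dict.contains_iff_mem_keys _ _).mpr hc.1)
      simp only [hkeq]
      rw [pvLoop2_eq k (pvCnt nums) _ _ _ hnd ?_ ?_ ?_ ?_ ?_]
      · rw [PySem.Dict.getD_counter, hkeys, hfd]
        unfold pvCnt
        ring
      · intro n hn
        exact pvCnt_pos nums n ((hmemK n).mp hn)
      · intro n hn
        rw [PySem.Dict.contains_insert, PySem.Dict.contains_counter]
        simp [(hmemK n).mp hn]
      · intro v
        rw [PySem.Dict.getD_insert]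
        split_ifs
        · exact PySem.Int.mod_nonneg _ (by omega)
        · rw [PySem.Dict.getD_counter]
          positivity
      · intro n hn h2 _
        rw [PySem.Dict.getD_insert, if_neg (by omega), PySem.Dict.getD_counter]
        rfl
      · intro n hn h2 h3
        have hn0 : n ≠ h0 := by omega
        have hkn0 : k - n ≠ h0 := by omega
        rw [PySem.Dict.getD_insert, if_neg hn0, PySem.Dict.getD_insert, if_neg hkn0,
          PySem.Dict.getD_counter, PySem.Dict.getD_counter]
        have hz : pvCnt nums (k - n) = 0 := by
          apply pvCnt_zero
          intro hmem
          exact h3 ((hmemK (k-n)).mpr hmem)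
        have hnn := pvCnt_nonneg nums n
        unfold pvCnt at hz hnn
        omega
    · rw [if_neg hc]
      have hr1 : PySem.Int.floordiv (pvCnt nums h0) 2 = 0 := by
        have hle : pvCnt nums h0 ≤ 1 := by
          by_cases hin : h0 ∈ (PySem.Dict.counter nums).keys
          · have := PySem.Dict.getD_counter nums h0
            have h4 : ¬ ((PySem.Dict.counter nums).getD h0 0 > 1) := fun h5 => hc ⟨hin, h5⟩
            unfold pvCnt
            omega
          · have := pvCnt_zero nums h0 (fun h5 => hin ((hmemK h0).mpr h5))
            omega
        rw [PySem.Int.floordiv_eq_ediv_of_pos (by omega)]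
        have := pvCnt_nonneg nums h0
        omega
      rw [hfd, hr1]
      rw [pvLoop2_eq k (pvCnt nums) _ _ _ hnd ?_ ?_ ?_ ?_ ?_]
      · rw [hkeys]
      · intro n hn
        exact pvCnt_pos nums n ((hmemK n).mp hn)
      · intro n hn
        rw [PySem.Dict.contains_counter]
        simp [(hmemK n).mp hn]
      · intro v
        rw [PySem.Dict.getD_counter]
        positivity
      · intro n hn h2 _
        rw [PySem.Dict.getD_counter]
        rfl
      · intro n hn h2 h3
        rw [PySem.Dict.getD_counter, PySem.Dict.getD_counter]
        have hz : pvCnt nums (k - n) = 0 := by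
          apply pvCnt_zero
          intro hmem
          exact h3 ((hmemK (k-n)).mpr hmem)
        have hnn := pvCnt_nonneg nums n
        unfold pvCnt at hz hnn
        omega
  · -- k odd: loop 1 is a no-op
    rw [if_neg hk]
    have hodd : ∀ n ∈ (PySem.Dict.counter nums).keys, n + n ≠ k := by
      intro n _ hnk
      exact hk ((PySem.Int.mod_eq_zero_iff_dvd k 2).mpr ⟨n, by omega⟩)
    rw [pvLoop1_skip k _ hodd]
    rw [pvLoop2_eq k (pvCnt nums) _ _ _ hnd ?_ ?_ ?_ ?_ ?_]
    · rw [hkeys]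
    · intro n hn
      exact pvCnt_pos nums n ((hmemK n).mp hn)
    · intro n hn
      rw [PySem.Dict.contains_counter]
      simp [(hmemK n).mp hn]
    · intro v
      rw [PySem.Dict.getD_counter]
      positivity
    · intro n hn h2 _
      rw [PySem.Dict.getD_counter]
      rfl
    · intro n hn h2 h3
      rw [PySem.Dict.getD_counter, PySem.Dict.getD_counter]
      have hz : pvCnt nums (k - n) = 0 := by
        apply pvCnt_zero
        intro hmem
        exact h3 ((hmemK (k-n)).mpr hmem)
      have hnn := pvCnt_nonneg nums n
      unfold pvCnt at hz hnn
      omega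

lemma pvS_eq_alt_sum (nums : List Int) (k : Int) :
    pvS k (pvCnt nums) (PySem.Set.ofList nums) =
      ((PySem.Set.ofList nums).map
        (fun v => if 2*v < k then min (pvCnt nums v) (pvCnt nums (k-v)) else 0)).sum := by
  rw [pvS_eq_T k (pvCnt nums) _ (PySem.Set.nodup_ofList nums)]
  apply congrArg
  apply List.map_congr_left
  intro v _
  by_cases h1 : 2*v < k
  · by_cases h2 : (k - v) ∈ PySem.Set.ofList nums
    · simp [h1, h2]
    · have hz : pvCnt nums (k - v) = 0 := by
        apply pvCnt_zero
        intro hmem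
        exact h2 ((PySem.Set.mem_ofList nums (k-v)).mpr hmem)
      have hnn := pvCnt_nonneg nums v
      simp [h1, h2, hz]
      omega
  · simp [h1]

-- ===== VERDICT (by name: the statement is the Claim_ definition above) =====
theorem maxOperations_Counter_spec : Claim_equal_maxOperations_Counter := by
  intro nums k _
  unfold Spec_maxOperations_Counter
  rw [pvA_eq, pvAlt_eq, pvS_eq_alt_sum]
  ring
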